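-- pv_equiv track=rewrite | github.com/CCTSAI-Tony/leetcode | leetcode/321. Create Maximum Number.py | maxSingleNumber
-- ===== SOURCE A (Python) =====
-- def maxSingleNumber(nums, selects):
--     n = len(nums)
--     ret = [-1]
--     while selects > 0:
--         start = ret[-1] + 1 #search start
--         end = n-selects + 1 #search end, n-selects + 1 確保第一輪select後面的字元加上select == selects總共的字元, 可以從總共只選1個字元想 end = n
--         ret.append( max(range(start, end), key = nums.__getitem__))
--         selects -= 1
--     ret = [nums[item] for item in ret[1:]]
--     return ret
-- ===== SOURCE B (Python) =====
-- def maxSingleNumber(nums, selects):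
--     # Monotonic-stack selection: one left-to-right pass keeping the
--     # lexicographically largest length-`selects` subsequence seen so far.
--     if selects > len(nums):
--         raise ValueError("cannot select more elements than the list holds")
--     if selects <= 0:
--         return []
--     drop = len(nums) - selects
--     stack = []
--     for x in nums:
--         while drop > 0 and stack and stack[-1] < x:
--             stack.pop()
--             drop -= 1
--         stack.append(x)
--     return stack[:selects]
-- ===== Notes on version B (the rewrite author's own statement) =====
-- stated objective: faster
-- what changed: A picks each of the k output elements with a fresh max(range(...), key=...) scan over the remaining window; B builds the same lexicographically largest length-k subsequence in a single left-to-right pass with a monotonic decreasing stack (pop while the top is smaller and enough drops remain).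
import Mathlib
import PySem

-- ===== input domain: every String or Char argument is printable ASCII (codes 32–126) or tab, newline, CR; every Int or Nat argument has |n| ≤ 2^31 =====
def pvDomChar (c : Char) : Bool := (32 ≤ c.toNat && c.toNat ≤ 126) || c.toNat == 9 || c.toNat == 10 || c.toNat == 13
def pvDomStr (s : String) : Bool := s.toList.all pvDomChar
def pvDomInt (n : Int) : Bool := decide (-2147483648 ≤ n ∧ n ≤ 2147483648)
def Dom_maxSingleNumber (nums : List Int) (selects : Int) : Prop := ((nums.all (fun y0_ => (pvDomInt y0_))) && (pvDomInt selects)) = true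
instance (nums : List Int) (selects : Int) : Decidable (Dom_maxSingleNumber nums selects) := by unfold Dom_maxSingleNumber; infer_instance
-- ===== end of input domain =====

-- B replaces A's per-pick window argmax scans with one monotonic-stack pass; equivalence is proved on selects ≤ len(nums), where both programs return (beyond it both raise ValueError).

-- ===== PORT A =====
-- nums[i] (indices produced by the loop are always in range under Pre_)
def pvAGet (nums : List Int) (i : Int) : Int := PySem.List.pyGetD nums i 0

-- max(lst, key=f): first element with maximal key; [] = Python ValueError (unreachable under Pre_)
def pvPyMax (f : Int → Int) : List Int → Int
  | [] => 0
  | h :: t => t.foldl (fun b i => if f i > f b then i else b) h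

-- the while-loop of A: ret accumulates [-1, idx0, idx1, ...]
def pvLoopA (nums : List Int) (selects : Int) (fuel : Nat) (ret : List Int) : List Int :=
  match fuel with
  | 0 => ret
  | Nat.succ fuel' =>
    let start := PySem.List.pyGetD ret (-1) 0 + 1
    let stop := (nums.length : Int) - selects + 1
    let idx := pvPyMax (pvAGet nums) (PySem.List.pyRange start stop 1)
    pvLoopA nums (selects - 1) fuel' (ret ++ [idx])

def maxSingleNumber (nums : List Int) (selects : Int) : List Int :=
  ((pvLoopA nums selects selects.toNat [-1]).drop 1).map (pvAGet nums)

-- ===== PORT B =====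
-- the inner while-loop of B: pop while drop > 0 and stack nonempty and top < x
-- (stack represented top-first: Python append/pop at the end = cons/tail here)
def pvPop (x : Int) (st : List Int) (d : Int) : List Int × Int :=
  match st with
  | [] => ([], d)
  | h :: t => if 0 < d then (if h < x then pvPop x t (d - 1) else (h :: t, d)) else (h :: t, d)

def pvStep (p : List Int × Int) (x : Int) : List Int × Int :=
  let q := pvPop x p.1 p.2
  (x :: q.1, q.2)

def maxSingleNumber_alt (nums : List Int) (selects : Int) : List Int :=
  if (nums.length : Int) < selects then []  -- Python B raises ValueError here (outside Pre_)
  else if selects ≤ 0 then []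
  else
    let r := nums.foldl pvStep ([], (nums.length : Int) - selects)
    r.1.reverse.take selects.toNat

-- ===== PRECONDITION & SPEC =====
-- Pre_ excludes exactly the inputs where both programs raise ValueError (selects > len(nums))
def Pre_maxSingleNumber (nums : List Int) (selects : Int) : Prop := selects ≤ (nums.length : Int)
instance (nums : List Int) (selects : Int) : Decidable (Pre_maxSingleNumber nums selects) := by unfold Pre_maxSingleNumber; infer_instance

def pvWitness_maxSingleNumber : List Int × Int := ([3, 1, 2, 5, 4], 3)

def Spec_maxSingleNumber (nums : List Int) (selects : Int) (out : List Int) : Prop := out = maxSingleNumber_alt nums selects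
instance (nums : List Int) (selects : Int) (out : List Int) : Decidable (Spec_maxSingleNumber nums selects out) := by unfold Spec_maxSingleNumber; infer_instance

-- ===== CLAIM (what is proved, stated in full; the proofs are below) =====
def Claim_equal_maxSingleNumber : Prop := ∀ (nums : List Int) (selects : Int), Dom_maxSingleNumber nums selects → Pre_maxSingleNumber nums selects → Spec_maxSingleNumber nums selects (maxSingleNumber nums selects)

-- ===== LEMMAS AND PROOFS =====

-- (j, M) = (index of the FIRST maximum of l, that maximum); (0, 0) on []
def pvFamv : List Int → Nat × Int
  | [] => (0, 0)
  | [x] => (0, x)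
  | x :: y :: t => let p := pvFamv (y :: t); if p.2 > x then (p.1 + 1, p.2) else (0, x)

-- first argmax (by key g) of a list of indices, recursive form of Python's max(..., key=g)
def pvArgIdx (g : Int → Int) : List Int → Int
  | [] => 0
  | [x] => x
  | x :: y :: t => let r := pvArgIdx g (y :: t); if g r > g x then r else x

-- the value sequence A/B both produce: pick first argmax of the window, recurse on the suffix
def pvGreedy (l : List Int) : Nat → List Int
  | 0 => []
  | Nat.succ k => let p := pvFamv (l.take (l.length - k)); p.2 :: pvGreedy (l.drop (p.1 + 1)) k

-- the absolute indices A's loop appends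
def pvIdxList (nums : List Int) (s : Nat) : Nat → List Int
  | 0 => []
  | Nat.succ k =>
    let i := s + (pvFamv ((nums.drop s).take (nums.length - s - k))).1
    (i : Int) :: pvIdxList nums (i + 1) k

theorem famv_fst_lt : ∀ (l : List Int), l ≠ [] → (pvFamv l).1 < l.length
  | [], h => absurd rfl h
  | [_], _ => by simp [pvFamv]
  | x :: y :: t, _ => by
    have ih := famv_fst_lt (y :: t) (by simp)
    simp only [List.length_cons] at ih
    simp only [pvFamv, List.length_cons]
    split_ifs <;> (simp; try omega)

theorem famv_getD : ∀ (l : List Int), l ≠ [] → l.getD (pvFamv l).1 0 = (pvFamv l).2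
  | [], h => absurd rfl h
  | [_], _ => by simp [pvFamv]
  | x :: y :: t, _ => by
    have ih := famv_getD (y :: t) (by simp)
    simp only [pvFamv]
    split_ifs with h
    · simpa using ih
    · simp

theorem famv_max : ∀ (l : List Int), ∀ y ∈ l, y ≤ (pvFamv l).2
  | [], _, hy => by simp at hy
  | [_], y, hy => by simp at hy; simp [pvFamv, hy]
  | x :: y :: t, z, hz => by
    have ih := famv_max (y :: t)
    simp only [pvFamv]
    rcases List.mem_cons.mp hz with rfl | hz'
    · split_ifs with h <;> (simp; try omega)
    · have := ih z hz'
      split_ifs with h <;> (simp; try omega)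

theorem famv_before : ∀ (l : List Int), ∀ q < (pvFamv l).1, l.getD q 0 < (pvFamv l).2
  | [], q, hq => by simp [pvFamv] at hq
  | [_], q, hq => by simp [pvFamv] at hq
  | x :: y :: t, q, hq => by
    have ih := famv_before (y :: t)
    simp only [pvFamv] at hq ⊢
    split_ifs with h
    · match q with
      | 0 => simpa using h
      | Nat.succ q' =>
        simp only [List.getD_cons_succ]
        exact ih q' (by split_ifs at hq; omega)
    · split_ifs at hq; omega

-- Python's left-fold max(key=) equals the recursive first-argmax
theorem foldl_argIdx (g : Int → Int) : ∀ (t : List Int) (b : Int),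
    t.foldl (fun b i => if g i > g b then i else b) b = pvArgIdx g (b :: t)
  | [], b => by simp [pvArgIdx]
  | x :: t', b => by
    have ih := foldl_argIdx g t' (if g x > g b then x else b)
    simp only [List.foldl_cons] at ih ⊢
    rw [ih]
    cases t' with
    | nil => simp [pvArgIdx]
    | cons y t'' =>
      simp only [pvArgIdx]
      split_ifs <;> first | rfl | omega

theorem pvArgIdx_cons (g : Int → Int) (x : Int) (l : List Int) (h : l ≠ []) :
    pvArgIdx g (x :: l) = if g (pvArgIdx g l) > g x then pvArgIdx g l else x := by
  cases l with
  | nil => exact absurd rfl h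
  | cons y t => simp [pvArgIdx]

theorem getD_drop_take (nums : List Int) (s m j : Nat) (h : j < m) (h2 : s + m ≤ nums.length) :
    ((nums.drop s).take m).getD j 0 = nums.getD (s + j) 0 := by
  have hj : s + j < nums.length := by omega
  rw [List.getD_eq_getElem?_getD, List.getD_eq_getElem?_getD, List.getElem?_take_of_lt h,
    List.getElem?_drop]

-- argmax over range(s, s+|w|) by nums.__getitem__ = s + first-argmax position of the window w
theorem argIdx_range (nums : List Int) : ∀ (w : List Int) (s : Nat), w ≠ [] →
    s + w.length ≤ nums.length →
    (∀ j, j < w.length → w.getD j 0 = nums.getD (s + j) 0) →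
    pvArgIdx (pvAGet nums) (PySem.List.pyRange (s : Int) ((s : Int) + w.length) 1) = (s : Int) + (pvFamv w).1
  | [], _, h, _, _ => absurd rfl h
  | [x], s, _, hlen, hcorr => by
    have h1 : ((s : Int) + ([x] : List Int).length) = (s : Int) + 1 := by simp
    rw [h1, PySem.List.pyRange_one_singleton]
    simp [pvArgIdx, pvFamv]
  | x :: y :: t, s, _, hlen, hcorr => by
    have hlen' : (s + 1) + (y :: t).length ≤ nums.length := by
      simp only [List.length_cons] at hlen ⊢; omega
    have ih := argIdx_range nums (y :: t) (s + 1) (by simp) hlen'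
      (fun j hj => by
        have := hcorr (j + 1) (by simp at hj ⊢; omega)
        simpa [Nat.add_assoc, Nat.add_comm 1 j, Nat.add_left_comm] using this)
    have h1 : (s : Int) < (s : Int) + (x :: y :: t).length := by
      simp only [List.length_cons]; push_cast; omega
    rw [PySem.List.pyRange_one_cons h1]
    have hne : PySem.List.pyRange ((s : Int) + 1) ((s : Int) + (x :: y :: t).length) 1 ≠ [] := by
      intro hnil
      have hlen0 := congrArg List.length hnil
      rw [PySem.List.length_pyRange_one] at hlen0
      simp only [List.length_cons, List.length_nil] at hlen0
      push_cast at hlen0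
      omega
    rw [pvArgIdx_cons _ _ _ hne]
    have hcast : ((s : Int) + 1) = ((s + 1 : Nat) : Int) := by push_cast; ring
    have hcast2 : ((s : Int) + (x :: y :: t).length) = ((s + 1 : Nat) : Int) + ((y :: t).length : Int) := by
      simp only [List.length_cons]; push_cast; ring
    rw [hcast, hcast2, ih]
    -- evaluate the two keys
    have hj := famv_fst_lt (y :: t) (by simp)
    have hkey1 : pvAGet nums (((s + 1 : Nat) : Int) + ((pvFamv (y :: t)).1 : Int)) = (pvFamv (y :: t)).2 := by
      have : (((s + 1 : Nat) : Int) + ((pvFamv (y :: t)).1 : Int)) = ((s + 1 + (pvFamv (y :: t)).1 : Nat) : Int) := by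
        push_cast; ring
      rw [this]
      unfold pvAGet
      rw [PySem.List.pyGetD_natCast]
      have := hcorr ((pvFamv (y :: t)).1 + 1) (by simp only [List.length_cons] at hj ⊢; omega)
      simp only [List.getD_cons_succ] at this
      rw [← famv_getD (y :: t) (by simp)]
      rw [this]
      congr 1
      omega
    have hkey2 : pvAGet nums ((s : Int)) = x := by
      have := hcorr 0 (by simp)
      simp only [List.getD_cons_zero, Nat.add_zero] at this
      unfold pvAGet
      rw [PySem.List.pyGetD_natCast, ← this]
    rw [hkey1, hkey2]
    simp only [pvFamv]
    split_ifs with h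
    · push_cast; ring
    · simp

theorem pvPyMax_cons (f : Int → Int) (h : Int) (t : List Int) :
    pvPyMax f (h :: t) = t.foldl (fun b i => if f i > f b then i else b) h := rfl

-- A's loop appends exactly pvIdxList
theorem loopA_eq (nums : List Int) : ∀ (k : Nat) (s : Nat) (ret : List Int),
    s + k ≤ nums.length → PySem.List.pyGetD ret (-1) 0 = (s : Int) - 1 →
    pvLoopA nums (k : Int) k ret = ret ++ pvIdxList nums s k
  | 0, s, ret, _, _ => by simp [pvLoopA, pvIdxList]
  | Nat.succ k, s, ret, hk, hlast => by
    simp only [pvLoopA, pvIdxList, hlast]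
    have hstart : (s : Int) - 1 + 1 = (s : Int) := by ring
    rw [hstart]
    set n := nums.length with hn
    set w : List Int := (nums.drop s).take (n - s - k) with hw
    have hwlen : w.length = n - s - k := by
      rw [hw]; simp only [List.length_take, List.length_drop]
      omega
    have hwne : w ≠ [] := by
      intro h0
      have := congrArg List.length h0
      rw [hwlen] at this; simp at this; omega
    have hstop : (n : Int) - (k + 1 : Nat) + 1 = (s : Int) + (w.length : Int) := by
      rw [hwlen]; push_cast; omega
    rw [hstop]
    -- the range is nonempty: peel one element so pvPyMax unfolds to a fold
    have hlt : (s : Int) < (s : Int) + (w.length : Int) := by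
      have : 0 < w.length := List.length_pos_of_ne_nil hwne
      omega
    have hcorr : ∀ j, j < w.length → w.getD j 0 = nums.getD (s + j) 0 := by
      intro j hj
      rw [hw]
      apply getD_drop_take
      · omega
      · rw [hwlen] at hj; omega
    have hargs : s + w.length ≤ n := by rw [hwlen]; omega
    have hmax : pvPyMax (pvAGet nums) (PySem.List.pyRange (s : Int) ((s : Int) + (w.length : Int)) 1)
        = (s : Int) + ((pvFamv w).1 : Int) := by
      rw [PySem.List.pyRange_one_cons hlt, pvPyMax_cons, foldl_argIdx,
        ← PySem.List.pyRange_one_cons hlt]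
      exact argIdx_range nums w s hwne hargs hcorr
    rw [hmax]
    set j := (pvFamv w).1 with hjdef
    have hjlt : j < n - s - k := by
      have := famv_fst_lt w hwne; rw [hwlen] at this; exact this
    have hcast : (s : Int) + (j : Int) = ((s + j : Nat) : Int) := by push_cast; ring
    have hk1 : ((Nat.succ k : Nat) : Int) - 1 = (k : Int) := by push_cast; omega
    rw [hcast, hk1]
    have hlast' : PySem.List.pyGetD (ret ++ [((s + j : Nat) : Int)]) (-1) 0 = ((s + j + 1 : Nat) : Int) - 1 := by
      rw [PySem.List.pyGetD_neg_one_append_singleton]; push_cast; ring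
    have hk' : (s + j + 1) + k ≤ nums.length := by omega
    rw [loopA_eq nums k (s + j + 1) (ret ++ [((s + j : Nat) : Int)]) hk' hlast']
    simp [List.append_assoc]

-- mapping nums[·] over those indices gives the greedy value sequence
theorem idxList_map (nums : List Int) : ∀ (k : Nat) (s : Nat), s + k ≤ nums.length →
    (pvIdxList nums s k).map (pvAGet nums) = pvGreedy (nums.drop s) k
  | 0, s, _ => by simp [pvIdxList, pvGreedy]
  | Nat.succ k, s, hk => by
    simp only [pvIdxList, pvGreedy, List.map_cons, List.length_drop]
    set n := nums.length with hn
    set w : List Int := (nums.drop s).take (n - s - k) with hw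
    have hwlen : w.length = n - s - k := by
      rw [hw]; simp only [List.length_take, List.length_drop]; omega
    have hwne : w ≠ [] := by
      intro h0
      have := congrArg List.length h0
      rw [hwlen] at this; simp at this; omega
    have hjlt : (pvFamv w).1 < n - s - k := by
      have := famv_fst_lt w hwne; rw [hwlen] at this; exact this
    set j := (pvFamv w).1 with hjdef
    refine List.cons_eq_cons.mpr ⟨?_, ?_⟩
    · -- heads agree
      unfold pvAGet
      rw [PySem.List.pyGetD_natCast]
      have := getD_drop_take nums s (n - s - k) j hjlt (by omega)
      rw [← hw] at this
      rw [← this, famv_getD w hwne]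
    · -- tails agree
      have ih := idxList_map nums k (s + j + 1) (by omega)
      rw [ih, List.drop_drop, show s + (j + 1) = s + j + 1 from by omega]

-- pvPop bookkeeping: result is a sublist with conserved budget
theorem pvPop_spec (x : Int) : ∀ (st : List Int) (d : Int),
    (∀ z ∈ (pvPop x st d).1, z ∈ st) ∧
    (pvPop x st d).2 = d - st.length + (pvPop x st d).1.length ∧
    (pvPop x st d).1.length ≤ st.length
  | [], d => by simp [pvPop]
  | h :: t, d => by
    have ih := pvPop_spec x t (d - 1)
    simp only [pvPop]
    split_ifs with h1 h2
    · refine ⟨fun z hz => List.mem_cons_of_mem _ (ih.1 z hz), ?_, ?_⟩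
      · have := ih.2.1; simp only [List.length_cons]; push_cast; omega
      · have := ih.2.2; simp only [List.length_cons]; omega
    · exact ⟨fun z hz => hz, by simp, le_refl _⟩
    · exact ⟨fun z hz => hz, by simp, le_refl _⟩

-- popping a stack entirely below a strictly larger element
theorem pvPop_all (x : Int) : ∀ (st : List Int) (d : Int), (∀ y ∈ st, y < x) →
    (st.length : Int) ≤ d → pvPop x st d = ([], d - st.length)
  | [], d, _, _ => by simp [pvPop]
  | h :: t, d, hlt, hd => by
    simp only [List.length_cons] at hd
    push_cast at hd
    simp only [pvPop]
    rw [if_pos (by omega), if_pos (hlt h (List.mem_cons_self))]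
    rw [pvPop_all x t (d - 1) (fun y hy => hlt y (List.mem_cons_of_mem _ hy)) (by omega)]
    simp only [List.length_cons]
    congr 1
    push_cast
    ring

-- a bottom element m that x cannot reach is inert
theorem pvPop_shield (x m : Int) : ∀ (st : List Int) (d : Int), ((st.length : Int) < d → x ≤ m) →
    pvPop x (st ++ [m]) d = ((pvPop x st d).1 ++ [m], (pvPop x st d).2)
  | [], d, h => by
    simp only [List.nil_append, pvPop]
    split_ifs with h1 h2
    · exfalso; have := h (by simpa using h1); omega
    · rfl
    · rfl
  | a :: t, d, h => by
    have ih := pvPop_shield x m t (d - 1)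
      (fun hlen => h (by simp only [List.length_cons]; push_cast at hlen ⊢; omega))
    simp only [List.cons_append, pvPop]
    split_ifs with h1 h2
    · exact ih
    · rfl
    · rfl

-- running the fold over p ++ [M] with everything < M and enough budget collapses to [M]
theorem run_collapse (M : Int) : ∀ (p st : List Int) (d : Int), (∀ y ∈ st, y < M) →
    (∀ y ∈ p, y < M) → (st.length : Int) + p.length ≤ d →
    (p ++ [M]).foldl pvStep (st, d) = ([M], d - st.length - p.length)
  | [], st, d, hst, _, hd => by
    simp only [List.nil_append, List.foldl_cons, List.foldl_nil, pvStep]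
    rw [pvPop_all M st d hst (by simpa using hd)]
    simp
  | a :: p', st, d, hst, hp, hd => by
    simp only [List.cons_append, List.foldl_cons, pvStep]
    obtain ⟨hsub, hlen, hle⟩ := pvPop_spec a st d
    have ha : a < M := hp a (List.mem_cons_self)
    have ih := run_collapse M p' (a :: (pvPop a st d).1) (pvPop a st d).2
      (by
        intro y hy
        rcases List.mem_cons.mp hy with rfl | hy'
        · exact ha
        · exact hst y (hsub y hy'))
      (fun y hy => hp y (List.mem_cons_of_mem _ hy))
      (by simp only [List.length_cons] at *; push_cast at *; omega)
    rw [ih]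
    simp only [List.length_cons]
    congr 1
    push_cast at *
    omega

-- a bottom element never reachable within the budget is inert for the whole run
theorem run_shield (m : Int) : ∀ (l st : List Int) (d : Int),
    (∀ p, p < l.length → (st.length : Int) + p < d → l.getD p 0 ≤ m) →
    l.foldl pvStep (st ++ [m], d) = ((l.foldl pvStep (st, d)).1 ++ [m], (l.foldl pvStep (st, d)).2)
  | [], st, d, _ => by simp
  | x :: l', st, d, h => by
    simp only [List.foldl_cons, pvStep]
    obtain ⟨hsub, hlen, hle⟩ := pvPop_spec x st d
    rw [pvPop_shield x m st d (fun hl => by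
      have := h 0 (by simp) (by simpa using hl)
      simpa using this)]
    have ih := run_shield m l' (x :: (pvPop x st d).1) (pvPop x st d).2
      (by
        intro p hp hd'
        have := h (p + 1) (by simp only [List.length_cons]; omega)
          (by simp only [List.length_cons] at hd' ⊢; push_cast at hd' ⊢; omega)
        simpa using this)
    exact ih

-- B's stack pass computes the greedy value sequence
theorem bridge2 : ∀ (k : Nat) (l : List Int), k ≤ l.length →
    ((l.foldl pvStep ([], (l.length : Int) - k)).1.reverse).take k = pvGreedy l k
  | 0, l, _ => by simp [pvGreedy]
  | Nat.succ k, l, hk => by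
    set n := l.length with hn
    set w : List Int := l.take (n - k) with hw
    have hwlen : w.length = n - k := by rw [hw]; simp only [List.length_take]; omega
    have hwne : w ≠ [] := by
      intro h0; have := congrArg List.length h0; rw [hwlen] at this; simp at this; omega
    set j := (pvFamv w).1 with hjdef
    set M := (pvFamv w).2 with hMdef
    have hjlt : j < n - k := by have := famv_fst_lt w hwne; rw [hwlen] at this; exact this
    have hjn : j < n := by omega
    have hgetw : ∀ q, q < n - k → l.getD q 0 = w.getD q 0 := by
      intro q hq
      rw [hw, List.getD_eq_getElem?_getD, List.getD_eq_getElem?_getD, List.getElem?_take_of_lt hq]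
    have hM : l.getD j 0 = M := by rw [hgetw j hjlt, hMdef, famv_getD w hwne]
    -- decompose l around position j
    have hdecomp : l = l.take j ++ ([M] ++ l.drop (j + 1)) := by
      conv_lhs => rw [← List.take_append_drop j l]
      congr 1
      rw [List.drop_eq_getElem_cons (by omega : j < l.length), List.singleton_append]
      congr 1
      rw [← hM, List.getD_eq_getElem?_getD, List.getElem?_eq_getElem (by omega : j < l.length)]
      rfl
    have hfold : l.foldl pvStep ([], (n : Int) - (Nat.succ k : Nat)) =
        (l.drop (j + 1)).foldl pvStep ((l.take j ++ [M]).foldl pvStep ([], (n : Int) - (Nat.succ k : Nat))) := by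
      conv_lhs => rw [hdecomp]
      rw [← List.foldl_append, ← List.append_assoc]
    have hcollapse : (l.take j ++ [M]).foldl pvStep ([], (n : Int) - (Nat.succ k : Nat)) =
        ([M], (n : Int) - (Nat.succ k : Nat) - j) := by
      have := run_collapse M (l.take j) [] ((n : Int) - (Nat.succ k : Nat))
        (by simp)
        (by
          intro y hy
          obtain ⟨q, hq, rfl⟩ := List.mem_iff_getElem.mp hy
          rw [List.length_take] at hq
          have hql : q < j := by omega
          have : (l.take j)[q] = l.getD q 0 := by
            rw [List.getElem_take, List.getD_eq_getElem?_getD,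
              List.getElem?_eq_getElem (by omega : q < l.length)]
            rfl
          rw [this, hgetw q (by omega)]
          have := famv_before w q (by rw [← hjdef]; omega)
          rw [← hMdef] at this
          exact this)
        (by
          simp only [List.length_nil, List.length_take, Nat.cast_zero, zero_add]
          have hmin : min j l.length = j := by omega
          rw [hmin]; push_cast; omega)
      rw [this]
      have hmin : min j l.length = j := by omega
      simp only [List.length_nil, List.length_take, hmin, Nat.cast_zero]
      congr 1
      omega
    have hshield := run_shield M (l.drop (j + 1)) [] ((n : Int) - (Nat.succ k : Nat) - j)
      (by
        intro p hp hd'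
        simp only [List.length_nil, Nat.cast_zero, zero_add] at hd'
        have hplt : j + 1 + p < n - k := by push_cast at hd'; omega
        have : (l.drop (j + 1)).getD p 0 = l.getD (j + 1 + p) 0 := by
          rw [List.getD_eq_getElem?_getD, List.getD_eq_getElem?_getD, List.getElem?_drop]
        rw [this, hgetw _ hplt]
        have hmem : w.getD (j + 1 + p) 0 ∈ w := by
          rw [List.getD_eq_getElem (hn := by omega)]
          exact List.getElem_mem _
        exact famv_max w _ hmem)
    simp only [List.nil_append] at hshield
    rw [hfold, hcollapse, hshield]
    have hd : (n : Int) - (Nat.succ k : Nat) - j = ((l.drop (j + 1)).length : Int) - k := by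
      simp only [List.length_drop]; push_cast; omega
    rw [hd]
    have ih := bridge2 k (l.drop (j + 1)) (by simp only [List.length_drop]; omega)
    simp only [List.reverse_append, List.reverse_cons, List.reverse_nil, List.nil_append,
      List.singleton_append, List.take_succ_cons]
    rw [ih]
    simp only [pvGreedy]
    rw [← hw, ← hjdef, ← hMdef]

-- ===== VERDICT (by name: the statement is the Claim_ definition above) =====
theorem maxSingleNumber_spec : Claim_equal_maxSingleNumber := by
  intro nums selects _ hpre
  unfold Pre_maxSingleNumber at hpre
  unfold Spec_maxSingleNumber maxSingleNumber maxSingleNumber_alt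
  rw [if_neg (by omega : ¬ ((nums.length : Int) < selects))]
  by_cases hs : selects ≤ 0
  · have h0 : selects.toNat = 0 := by omega
    rw [if_pos hs, h0]
    simp [pvLoopA]
  · rw [if_neg hs]
    set k := selects.toNat with hkdef
    have hsel : (k : Int) = selects := by omega
    have hk : k ≤ nums.length := by omega
    have hA : pvLoopA nums selects k [-1] = [-1] ++ pvIdxList nums 0 k := by
      rw [← hsel]
      exact loopA_eq nums k 0 [-1] (by omega) (by decide)
    rw [hA]
    have hdrop : (([-1] ++ pvIdxList nums 0 k) : List Int).drop 1 = pvIdxList nums 0 k := by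
      simp
    rw [hdrop, idxList_map nums k 0 (by omega), List.drop_zero, ← hsel, ← bridge2 k nums hk]
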